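-- pv_equiv track=rewrite | github.com/aiterahai/Algorithm | 프로그래머스/lv2/42626. 더 맵게/더 맵게.py | solution
-- ===== SOURCE A (Python) =====
-- import heapq
--
-- def solution(scoville, K):
--     answer = 0
--     heapq.heapify(scoville)
--     while len(scoville) >= 2:
--         if scoville[0] >= K: return answer
--         answer += 1
--         heapq.heappush(scoville, heapq.heappop(scoville) + heapq.heappop(scoville) * 2)
--     if K <= heapq.heappop(scoville): return answer
--     return -1
-- ===== SOURCE B (Python) =====
-- def _insort(v, xs):
--     # insert v into sorted xs, keeping it sorted (linear scan)
--     out = []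
--     i = 0
--     while i < len(xs) and xs[i] < v:
--         out.append(xs[i])
--         i += 1
--     out.append(v)
--     out.extend(xs[i:])
--     return out
--
--
-- def solution(scoville, K):
--     answer = 0
--     xs = sorted(scoville)
--     while len(xs) >= 2:
--         if xs[0] >= K:
--             return answer
--         xs = _insort(xs[0] + xs[1] * 2, xs[2:])
--         answer += 1
--     if K <= xs[0]:
--         return answer
--     return -1
-- ===== Notes on version B (the rewrite author's own statement) =====
-- stated objective: alternative
-- what changed: Replaces the binary heap with a sort-once strategy: sort the list, then repeatedly combine the first two elements and re-insert the mix by a linear ordered insert into the sorted list.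
import Mathlib
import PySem

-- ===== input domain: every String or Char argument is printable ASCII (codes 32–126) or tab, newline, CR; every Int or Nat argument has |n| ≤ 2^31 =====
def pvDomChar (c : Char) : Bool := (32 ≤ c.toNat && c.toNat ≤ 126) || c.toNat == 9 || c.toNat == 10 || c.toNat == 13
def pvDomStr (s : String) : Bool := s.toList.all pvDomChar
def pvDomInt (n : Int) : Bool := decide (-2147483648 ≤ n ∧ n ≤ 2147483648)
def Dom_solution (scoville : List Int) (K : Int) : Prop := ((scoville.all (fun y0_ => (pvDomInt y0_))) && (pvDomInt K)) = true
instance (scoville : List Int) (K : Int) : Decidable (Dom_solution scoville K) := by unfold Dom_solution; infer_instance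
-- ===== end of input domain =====

-- A mixes the two weakest scovilles with a heap until all reach K; B sorts once and maintains a
-- sorted list via a linear ordered insert (alternative decomposition, not claimed faster).
-- Python A mutates its `scoville` argument in place (heapify/pops); the equivalence proved here is
-- about the return value only. Python's heapq is ported as a verified min-heap (skew heap): exact
-- for the return value, since only the sequence of popped minima of an Int heap is observed.
-- Both loops use structural fuel (heap size / list length) purely as a termination guard.


-- ===== PORT A =====
-- heapq is ported as a skew min-heap: heappush/heappop return exactly what heapq returns on Ints.
inductive SHeap where
  | nil : SHeap
  | node : Int → SHeap → SHeap → SHeap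
deriving DecidableEq, Repr

def SHeap.size : SHeap → Nat
  | .nil => 0
  | .node _ l r => l.size + r.size + 1

-- fuel (≥ sum of sizes) only guards termination; the 0 case is never reached on real calls
def SHeap.mergeF : Nat → SHeap → SHeap → SHeap
  | 0, _, _ => .nil
  | _ + 1, .nil, h => h
  | _ + 1, h, .nil => h
  | f + 1, .node a l1 r1, .node b l2 r2 =>
    if a ≤ b then .node a (SHeap.mergeF f r1 (.node b l2 r2)) l1
    else .node b (SHeap.mergeF f (.node a l1 r1) r2) l2

def SHeap.merge (a b : SHeap) : SHeap := SHeap.mergeF (a.size + b.size) a b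

def SHeap.push (v : Int) (h : SHeap) : SHeap := SHeap.merge (.node v .nil .nil) h

-- heappop: the root is the returned minimum, the remainder is the merge of the children
def SHeap.pop : SHeap → Int × SHeap
  | .nil => (0, .nil)  -- heappop of the empty heap raises in Python; excluded by Pre_
  | .node v l r => (v, l.merge r)

-- the while-loop of A: condition len >= 2, early return on scoville[0] >= K,
-- then heappush(heappop() + heappop()*2); after the loop one final heappop decides answer / -1.
def runA (fuel : Nat) (h : SHeap) (answer : Int) (K : Int) : Int :=
  if 2 ≤ h.size then
    match fuel, h with
    | f + 1, .node v l r =>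
      if v ≥ K then answer
      else
        runA f (SHeap.push (v + (SHeap.pop (l.merge r)).1 * 2) (SHeap.pop (l.merge r)).2)
          (answer + 1) K
    | _, _ => -2  -- fuel exhausted: unreachable, fuel starts at the heap size
  else
    match h with
    | .nil => -2  -- Python: heappop of the empty heap raises IndexError (outside Pre_)
    | .node v _ _ => if K ≤ v then answer else -1

def solution (scoville : List Int) (K : Int) : Int :=
  runA scoville.length (scoville.foldl (fun h x => SHeap.push x h) SHeap.nil) 0 K

-- ===== PORT B =====
-- _insort: linear scan past the elements smaller than v, then v, then the rest
def insortB (v : Int) : List Int → List Int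
  | [] => [v]
  | x :: t => if x < v then x :: insortB v t else v :: x :: t

-- the while-loop of B over the sorted list (fuel = initial length, a pure termination guard)
def runB (fuel : Nat) (xs : List Int) (answer : Int) (K : Int) : Int :=
  match fuel, xs with
  | f + 1, a :: b :: t =>
    if a ≥ K then answer else runB f (insortB (a + b * 2) t) (answer + 1) K
  | _, [a] => if K ≤ a then answer else -1
  | _, [] => -2  -- Python: xs[0] on the empty list raises IndexError (outside Pre_)
  | 0, _ => -2  -- fuel exhausted: unreachable, fuel starts at the list length

def solution_alt (scoville : List Int) (K : Int) : Int :=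
  runB scoville.length (PySem.List.sorted scoville (fun x => x) false) 0 K

-- ===== PRECONDITION & SPEC =====
-- Pre_ excludes only the empty list, on which both Pythons raise IndexError.
def Pre_solution (scoville : List Int) (K : Int) : Prop := scoville ≠ []
instance (scoville : List Int) (K : Int) : Decidable (Pre_solution scoville K) := by
  unfold Pre_solution; infer_instance
def pvWitness_solution : List Int × Int := ([1, 2, 3, 9, 10, 12], 7)

def Spec_solution (scoville : List Int) (K : Int) (out : Int) : Prop := out = solution_alt scoville K
instance (scoville : List Int) (K : Int) (out : Int) : Decidable (Spec_solution scoville K out) := by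
  unfold Spec_solution; infer_instance

-- ===== CLAIM (what is proved, stated in full; the proofs are below) =====
def Claim_equal_solution : Prop := ∀ (scoville : List Int) (K : Int), Dom_solution scoville K → Pre_solution scoville K → Spec_solution scoville K (solution scoville K)

-- ===== LEMMAS AND PROOFS =====

def SHeap.toList : SHeap → List Int
  | .nil => []
  | .node v l r => v :: (l.toList ++ r.toList)

def SHeap.IsHeap : SHeap → Prop
  | .nil => True
  | .node v l r => (∀ x ∈ l.toList ++ r.toList, v ≤ x) ∧ l.IsHeap ∧ r.IsHeap

theorem SHeap.size_eq_zero {h : SHeap} (hs : h.size = 0) : h = .nil := by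
  cases h with
  | nil => rfl
  | node v l r => simp [SHeap.size] at hs

theorem SHeap.toList_mergeF : ∀ (f : Nat) (a b : SHeap), a.size + b.size ≤ f →
    (SHeap.mergeF f a b).toList.Perm (a.toList ++ b.toList) := by
  intro f
  induction f with
  | zero =>
    intro a b hf
    have ha : a = .nil := SHeap.size_eq_zero (by omega)
    have hb : b = .nil := SHeap.size_eq_zero (by omega)
    subst ha; subst hb
    simp [SHeap.mergeF, SHeap.toList]
  | succ f ih =>
    intro a b hf
    match a, b with
    | .nil, h => simp [SHeap.mergeF, SHeap.toList]
    | .node a l1 r1, .nil => simp [SHeap.mergeF, SHeap.toList]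
    | .node a l1 r1, .node b l2 r2 =>
      simp only [SHeap.mergeF]
      simp only [SHeap.size] at hf
      split
      · have h1 := ih r1 (.node b l2 r2) (by simp [SHeap.size]; omega)
        simp only [SHeap.toList] at *
        rw [List.perm_iff_count] at *
        intro x
        have h2 := h1 x
        simp only [List.count_append, List.count_cons] at *
        omega
      · have h1 := ih (.node a l1 r1) r2 (by simp [SHeap.size]; omega)
        simp only [SHeap.toList] at *
        rw [List.perm_iff_count] at *
        intro x
        have h2 := h1 x
        simp only [List.count_append, List.count_cons] at *
        omega

theorem SHeap.toList_merge (a b : SHeap) : (a.merge b).toList.Perm (a.toList ++ b.toList) :=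
  SHeap.toList_mergeF _ a b (le_refl _)

theorem SHeap.root_le {v : Int} {l r : SHeap} (hh : (SHeap.node v l r).IsHeap) :
    ∀ x ∈ (SHeap.node v l r).toList, v ≤ x := by
  intro x hx
  simp only [SHeap.toList, List.mem_cons] at hx
  rcases hx with rfl | h
  · exact le_refl x
  · exact hh.1 x h

theorem SHeap.isHeap_mergeF : ∀ (f : Nat) (a b : SHeap), a.size + b.size ≤ f →
    a.IsHeap → b.IsHeap → (SHeap.mergeF f a b).IsHeap := by
  intro f
  induction f with
  | zero => intro a b hf ha hb; simp [SHeap.mergeF, SHeap.IsHeap]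
  | succ f ih =>
    intro a b hf ha hb
    match a, b with
    | .nil, h => simpa [SHeap.mergeF] using hb
    | .node a l1 r1, .nil => simpa [SHeap.mergeF] using ha
    | .node a l1 r1, .node b l2 r2 =>
      simp only [SHeap.mergeF]
      simp only [SHeap.size] at hf
      have hfr : r1.size + (SHeap.node b l2 r2).size ≤ f := by simp [SHeap.size]; omega
      have hfl : (SHeap.node a l1 r1).size + r2.size ≤ f := by simp [SHeap.size]; omega
      split
      · refine ⟨?_, ih r1 (.node b l2 r2) hfr ha.2.2 hb, ha.2.1⟩
        intro x hx
        rw [List.mem_append] at hx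
        rcases hx with hx | hx
        · rw [(SHeap.toList_mergeF f r1 (.node b l2 r2) hfr).mem_iff, List.mem_append] at hx
          rcases hx with hx | hx
          · exact ha.1 x (by simp [hx])
          · exact le_trans (by omega) (SHeap.root_le hb x hx)
        · exact ha.1 x (by simp [hx])
      · refine ⟨?_, ih (.node a l1 r1) r2 hfl ha hb.2.2, hb.2.1⟩
        intro x hx
        rw [List.mem_append] at hx
        rcases hx with hx | hx
        · rw [(SHeap.toList_mergeF f (.node a l1 r1) r2 hfl).mem_iff, List.mem_append] at hx
          rcases hx with hx | hx
          · exact le_trans (by omega) (SHeap.root_le ha x hx)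
          · exact hb.1 x (by simp [hx])
        · exact hb.1 x (by simp [hx])

theorem SHeap.isHeap_merge (a b : SHeap) (ha : a.IsHeap) (hb : b.IsHeap) :
    (a.merge b).IsHeap :=
  SHeap.isHeap_mergeF _ a b (le_refl _) ha hb

theorem SHeap.length_toList (h : SHeap) : h.toList.length = h.size := by
  induction h with
  | nil => simp [SHeap.toList, SHeap.size]
  | node v l r ihl ihr => simp [SHeap.toList, SHeap.size, ihl, ihr]

theorem SHeap.isHeap_push (v : Int) (h : SHeap) (hh : h.IsHeap) : (SHeap.push v h).IsHeap :=
  SHeap.isHeap_merge _ _ (by constructor <;> simp [SHeap.toList, SHeap.IsHeap]) hh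

theorem SHeap.toList_push (v : Int) (h : SHeap) : (SHeap.push v h).toList.Perm (v :: h.toList) :=
  SHeap.toList_merge _ _

theorem heapify_spec (xs : List Int) : ∀ acc : SHeap, acc.IsHeap →
    (xs.foldl (fun h x => SHeap.push x h) acc).IsHeap ∧
    (xs.foldl (fun h x => SHeap.push x h) acc).toList.Perm (acc.toList ++ xs) := by
  induction xs with
  | nil => intro acc h; refine ⟨h, ?_⟩; simp
  | cons x t ih =>
    intro acc h
    obtain ⟨h1, h2⟩ := ih (SHeap.push x acc) (SHeap.isHeap_push x acc h)
    refine ⟨h1, ?_⟩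
    simp only [List.foldl_cons]
    refine h2.trans (((SHeap.toList_push x acc).append_right t).trans ?_)
    rw [List.perm_iff_count]; intro y
    simp only [List.count_append, List.count_cons]; omega

theorem perm_insortB (v : Int) (t : List Int) : (insortB v t).Perm (v :: t) := by
  induction t with
  | nil => simp [insortB]
  | cons x t ih =>
    simp only [insortB]
    split
    · exact (ih.cons x).trans (List.Perm.swap v x t)
    · exact List.Perm.refl _

theorem sorted_insortB (v : Int) (t : List Int) (hs : t.Pairwise (· ≤ ·)) :
    (insortB v t).Pairwise (· ≤ ·) := by
  induction t with
  | nil => simp [insortB]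
  | cons x t ih =>
    simp only [insortB]
    rw [List.pairwise_cons] at hs
    split
    · refine List.pairwise_cons.2 ⟨?_, ih hs.2⟩
      intro y hy
      rw [(perm_insortB v t).mem_iff, List.mem_cons] at hy
      rcases hy with rfl | hy'
      · omega
      · exact hs.1 y hy'
    · refine List.pairwise_cons.2 ⟨?_, List.pairwise_cons.2 ⟨hs.1, hs.2⟩⟩
      intro y hy
      rw [List.mem_cons] at hy
      rcases hy with rfl | hy'
      · omega
      · exact le_trans (show v ≤ x by omega) (hs.1 y hy')

theorem SHeap.size_merge (a b : SHeap) : (a.merge b).size = a.size + b.size := by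
  rw [← SHeap.length_toList, (SHeap.toList_merge a b).length_eq]
  simp [SHeap.length_toList]

theorem SHeap.size_push (v : Int) (h : SHeap) : (SHeap.push v h).size = h.size + 1 := by
  rw [← SHeap.length_toList, (SHeap.toList_push v h).length_eq]
  simp [SHeap.length_toList]

theorem runA_nil (fa : Nat) (ans K : Int) : runA fa .nil ans K = -2 := by
  rw [runA.eq_def]
  simp [SHeap.size]

theorem runA_one (fa : Nat) (v : Int) (l r : SHeap) (ans K : Int)
    (h1 : ¬ 2 ≤ (SHeap.node v l r).size) :
    runA fa (.node v l r) ans K = if K ≤ v then ans else -1 := by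
  rw [runA.eq_def, if_neg h1]

theorem runA_step (fa : Nat) (v : Int) (l r : SHeap) (ans K : Int)
    (h2 : 2 ≤ (SHeap.node v l r).size) :
    runA (fa + 1) (.node v l r) ans K =
      if v ≥ K then ans
      else runA fa (SHeap.push (v + (SHeap.pop (l.merge r)).1 * 2) (SHeap.pop (l.merge r)).2)
        (ans + 1) K := by
  rw [runA.eq_def, if_pos h2]

theorem runB_nil (fb : Nat) (ans K : Int) : runB fb [] ans K = -2 := by
  cases fb <;> rfl

theorem runB_one (fb : Nat) (a ans K : Int) : runB fb [a] ans K = if K ≤ a then ans else -1 := by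
  cases fb <;> rfl

-- the heart of the proof: A's heap loop and B's sorted-list loop agree whenever the heap's
-- contents are a permutation of the sorted list's contents (and both have enough fuel)
theorem main_lemma : ∀ (n : Nat) (fa fb : Nat) (h : SHeap) (xs : List Int) (ans K : Int),
    h.size = n → n ≤ fa + 1 → n ≤ fb + 1 → h.IsHeap → xs.Pairwise (· ≤ ·) → h.toList.Perm xs →
    runA fa h ans K = runB fb xs ans K := by
  intro n
  induction n using Nat.strong_induction_on with
  | _ n ih =>
    intro fa fb h xs ans K hn hfa hfb hh hs hp
    match xs with
    | [] =>
      have hl : h.toList = [] := hp.eq_nil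
      have : h = .nil := by cases h <;> simp [SHeap.toList] at hl ⊢
      subst this
      rw [runA_nil, runB_nil]
    | [a] =>
      have hl : h.toList = [a] := List.perm_singleton.1 hp
      match h with
      | .nil => simp [SHeap.toList] at hl
      | .node v l r =>
        simp only [SHeap.toList] at hl
        injection hl with hv hrest
        rcases List.append_eq_nil_iff.1 hrest with ⟨hl0, hr0⟩
        have hsz : (SHeap.node v l r).size = 1 := by
          rw [← SHeap.length_toList]; simp [SHeap.toList, hl0, hr0]
        rw [runA_one fa v l r ans K (by omega), runB_one, hv]
    | a :: b :: t =>
      have hlen : h.toList.length = t.length + 2 := by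
        rw [hp.length_eq]; simp
      have hsz2 : 2 ≤ h.size := by rw [← SHeap.length_toList]; omega
      match h with
      | .node v l r =>
        -- the heap's root is the minimum, i.e. the head of the sorted list
        have hva : v = a := by
          have h1 : v ≤ a := SHeap.root_le hh a (hp.mem_iff.2 (by simp))
          have h2 : a ≤ v := by
            have hv_mem : v ∈ a :: b :: t := hp.mem_iff.1 (by simp [SHeap.toList])
            rcases List.mem_cons.1 hv_mem with rfl | hv' <;>
              [omega; exact (List.pairwise_cons.1 hs).1 v hv']
          omega
        have hn2 : 2 ≤ n := by omega
        cases fa with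
        | zero => omega
        | succ fa =>
        cases fb with
        | zero => omega
        | succ fb =>
          rw [runA_step fa v l r ans K hsz2]
          rw [show runB (fb + 1) (a :: b :: t) ans K =
            if a ≥ K then ans else runB fb (insortB (a + b * 2) t) (ans + 1) K from rfl]
          simp only [hva]
          by_cases hK : a ≥ K
          · simp [hK]
          · simp only [if_neg hK]
            have hm : (l.merge r).toList.Perm (b :: t) := by
              have h1 : (l.merge r).toList.Perm (l.toList ++ r.toList) := SHeap.toList_merge l r
              have h2 : (v :: (l.toList ++ r.toList)).Perm (a :: b :: t) := by
                simpa [SHeap.toList] using hp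
              rw [hva] at h2
              exact h1.trans h2.cons_inv
            have hmheap : (l.merge r).IsHeap := SHeap.isHeap_merge l r hh.2.1 hh.2.2
            match hme : l.merge r with
            | .nil =>
              exfalso
              rw [hme] at hm
              have := hm.length_eq
              simp [SHeap.toList] at this
            | .node w l2 r2 =>
              rw [hme] at hm hmheap
              -- the second pop returns the second smallest, i.e. the second of the sorted list
              have hwb : w = b := by
                have h1 : w ≤ b := SHeap.root_le hmheap b (hm.mem_iff.2 (by simp))
                have h2 : b ≤ w := by
                  have hw_mem : w ∈ b :: t := hm.mem_iff.1 (by simp [SHeap.toList])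
                  rcases List.mem_cons.1 hw_mem with rfl | hw' <;>
                    [omega; exact (List.pairwise_cons.1 (List.pairwise_cons.1 hs).2).1 w hw']
                omega
              have ht_pw : t.Pairwise (· ≤ ·) := (List.pairwise_cons.1 (List.pairwise_cons.1 hs).2).2
              have hrest : (l2.merge r2).toList.Perm t := by
                have h1 : (l2.merge r2).toList.Perm (l2.toList ++ r2.toList) := SHeap.toList_merge l2 r2
                have h2 : (w :: (l2.toList ++ r2.toList)).Perm (b :: t) := by
                  simpa [SHeap.toList] using hm
                rw [hwb] at h2
                exact h1.trans h2.cons_inv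
              simp only [SHeap.pop]
              have hnext_perm : (SHeap.push (a + w * 2) (l2.merge r2)).toList.Perm (insortB (a + b * 2) t) := by
                refine (SHeap.toList_push _ _).trans ?_
                rw [hwb]
                exact ((hrest.cons _)).trans (perm_insortB (a + b * 2) t).symm
              have hnext_heap : (SHeap.push (a + w * 2) (l2.merge r2)).IsHeap :=
                SHeap.isHeap_push _ _ (SHeap.isHeap_merge l2 r2 hmheap.2.1 hmheap.2.2)
              have hnext_sorted : (insortB (a + b * 2) t).Pairwise (· ≤ ·) := sorted_insortB _ t ht_pw
              have hsize : (SHeap.push (a + w * 2) (l2.merge r2)).size = n - 1 := by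
                have e3 := congrArg SHeap.size hme
                rw [SHeap.size_merge] at e3
                simp only [SHeap.size] at e3 hn
                rw [SHeap.size_push, SHeap.size_merge]
                omega
              exact ih (n - 1) (by omega) fa fb _ _ (ans + 1) K hsize (by omega) (by omega)
                hnext_heap hnext_sorted hnext_perm

-- ===== VERDICT (by name: the statement is the Claim_ definition above) =====
theorem solution_spec : Claim_equal_solution := by
  intro scoville K hdom hpre
  unfold Spec_solution solution solution_alt
  obtain ⟨hh, hp⟩ := heapify_spec scoville SHeap.nil trivial
  have hsz : (scoville.foldl (fun h x => SHeap.push x h) SHeap.nil).size = scoville.length := by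
    rw [← SHeap.length_toList, hp.length_eq]; simp [SHeap.toList]
  refine main_lemma scoville.length scoville.length scoville.length _ _ 0 K hsz (by omega) (by omega) hh ?_ ?_
  · simpa using PySem.List.sorted_pairwise scoville (fun x => x)
  · refine (hp.trans ?_)
    simpa [SHeap.toList] using (PySem.List.sorted_perm scoville (fun x => x) false).symm
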